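-- pv_equiv track=rewrite | github.com/zixianl/CCC-assignment1 | util.py | merge_and_find_max
-- ===== SOURCE A (Python) =====
-- def merge_and_find_max(results_list):
--     """
--     Merges dictionaries and finds the maximum value.
--
--     Args:
--     - results_list: List of dictionaries.
--
--     Returns:
--     - Tuple containing the key with maximum value and the maximum value.
--     """
--     merged_dict = {}
--     for result in results_list:
--         for sub_dict in result:
--             for key, value in sub_dict.items():
--                 if key in merged_dict:
--                     merged_dict[key] += value
--                 else:
--                     merged_dict[key] = value
--
--     max_key = max(merged_dict, key=lambda k: merged_dict[k])
--     max_value = merged_dict[max_key]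
--
--     return max_key, max_value
-- ===== SOURCE B (Python) =====
-- def merge_and_find_max(results_list):
--     """Flatten all (key, value) pairs once, accumulate totals with dict.get,
--     then take the head of a stable sort by descending total (first-inserted
--     key wins ties, as in the original)."""
--     pairs = [item for result in results_list for sub_dict in result
--              for item in sub_dict.items()]
--     merged = {}
--     for key, value in pairs:
--         merged[key] = merged.get(key, 0) + value
--     return sorted(merged.items(), key=lambda kv: -kv[1])[0]
-- ===== Notes on version B (the rewrite author's own statement) =====
-- stated objective: alternative
-- what changed: Replaces the triple nested merge loop with a membership branch plus a max-by-key scan by: flatten all items once with a comprehension, accumulate totals via dict.get, and select the winner as the head of a stable sort by descending total.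
import Mathlib
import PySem

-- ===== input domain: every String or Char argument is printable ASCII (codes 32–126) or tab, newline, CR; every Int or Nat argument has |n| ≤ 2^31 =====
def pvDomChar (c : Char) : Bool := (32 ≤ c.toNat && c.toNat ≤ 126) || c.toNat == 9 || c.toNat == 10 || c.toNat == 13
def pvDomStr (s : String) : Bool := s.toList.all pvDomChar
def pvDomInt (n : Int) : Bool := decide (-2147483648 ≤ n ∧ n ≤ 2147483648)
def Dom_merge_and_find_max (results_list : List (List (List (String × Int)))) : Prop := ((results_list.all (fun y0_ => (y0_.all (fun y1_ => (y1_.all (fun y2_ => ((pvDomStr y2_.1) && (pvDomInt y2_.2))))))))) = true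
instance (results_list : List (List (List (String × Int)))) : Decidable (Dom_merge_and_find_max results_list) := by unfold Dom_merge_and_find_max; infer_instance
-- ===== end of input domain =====

-- B replaces A's triple nested merge loop (membership branch) + max-by-key scan by one
-- flattening pass, a get-and-add accumulation, and head-of-stable-sort selection
-- (alternative decomposition; not claimed faster).

-- ===== PORT A =====
def merge_and_find_max (results_list : List (List (List (String × Int)))) : String × Int :=
  let merged_dict : PySem.Dict String Int :=
    results_list.foldl (fun merged_dict result =>
      result.foldl (fun merged_dict sub_dict =>
        (PySem.Dict.ofList sub_dict).items.foldl (fun merged_dict kv =>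
          if merged_dict.contains kv.1 then
            -- merged_dict[key] += value (key is present here, so getD _ 0 is the lookup)
            merged_dict.insert kv.1 (merged_dict.getD kv.1 0 + kv.2)
          else
            merged_dict.insert kv.1 kv.2) merged_dict) merged_dict) PySem.Dict.empty
  match PySem.List.max? merged_dict.keys (fun k => merged_dict.getD k 0) with
  | some max_key => (max_key, merged_dict.getD max_key 0)
  | none => ("", 0)   -- unreachable under Pre_: Python raises ValueError on an empty dict

-- ===== PORT B =====
def merge_and_find_max_alt (results_list : List (List (List (String × Int)))) : String × Int :=
  let pairs : List (String × Int) :=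
    results_list.flatMap (fun result =>
      result.flatMap (fun sub_dict => (PySem.Dict.ofList sub_dict).items))
  let merged : PySem.Dict String Int :=
    pairs.foldl (fun merged kv => merged.insert kv.1 (merged.getD kv.1 0 + kv.2))
      PySem.Dict.empty
  match PySem.List.sorted merged.items (fun kv => -kv.2) false with
  | kv :: _ => kv
  | [] => ("", 0)   -- unreachable under Pre_: Python raises IndexError on the empty list

-- ===== PRECONDITION & SPEC =====
-- Pre_ excludes exactly the inputs with no key/value pair at all: there Python A raises
-- ValueError (max of an empty dict) and Python B raises IndexError.
def Pre_merge_and_find_max (results_list : List (List (List (String × Int)))) : Prop :=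
  ∃ result ∈ results_list, ∃ sub_dict ∈ result, sub_dict ≠ []

instance (results_list : List (List (List (String × Int)))) : Decidable (Pre_merge_and_find_max results_list) := by unfold Pre_merge_and_find_max; infer_instance

def pvWitness_merge_and_find_max : (List (List (List (String × Int)))) := [[[("a", 1)]]]

def Spec_merge_and_find_max (results_list : List (List (List (String × Int)))) (out : String × Int) : Prop := out = merge_and_find_max_alt results_list
instance (results_list : List (List (List (String × Int)))) (out : String × Int) : Decidable (Spec_merge_and_find_max results_list out) := by unfold Spec_merge_and_find_max; infer_instance

-- ===== CLAIM (what is proved, stated in full; the proofs are below) =====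
def Claim_equal_merge_and_find_max : Prop := ∀ (results_list : List (List (List (String × Int)))), Dom_merge_and_find_max results_list → Pre_merge_and_find_max results_list → Spec_merge_and_find_max results_list (merge_and_find_max results_list)

-- ===== LEMMAS AND PROOFS =====

-- A fold over a flatMap is the nested fold.
theorem pv_foldl_flatMap {α β γ : Type} (f : α → List β) (g : γ → β → γ) :
    ∀ (l : List α) (init : γ),
      (l.flatMap f).foldl g init = l.foldl (fun acc x => (f x).foldl g acc) init := by
  intro l
  induction l with
  | nil => intro init; simp
  | cons x xs ih => intro init; simp [List.foldl_append, ih]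

-- A's merge step equals B's merge step on every state.
theorem pv_step_eq (m : PySem.Dict String Int) (kv : String × Int) :
    (if m.contains kv.1 then m.insert kv.1 (m.getD kv.1 0 + kv.2)
     else m.insert kv.1 kv.2) = m.insert kv.1 (m.getD kv.1 0 + kv.2) := by
  by_cases h : m.contains kv.1 = true
  · simp [h]
  · have h' : m.contains kv.1 = false := by simpa using h
    rw [if_neg (by simp [h']), PySem.Dict.getD_of_not_contains m 0 h', zero_add]

-- Python's max(xs, key=g) (first maximal element) as a plain running fold.
def pvPickMax {α : Type} (g : α → Int) (m : α) (rest : List α) : α :=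
  rest.foldl (fun m x => if g m < g x then x else m) m

theorem pv_max?_cons {α : Type} (g : α → Int) (k0 : α) (rest : List α) :
    PySem.List.max? (k0 :: rest) g = some (pvPickMax g k0 rest) := by
  have aux : ∀ (l : List α) (m : α),
      l.foldl (fun acc x => match acc with
        | none => some x
        | some m => if g m < g x then some x else some m) (some m)
      = some (l.foldl (fun m x => if g m < g x then x else m) m) := by
    intro l
    induction l with
    | nil => intro m; rfl
    | cons x xs ih =>
      intro m
      simp only [List.foldl_cons]
      by_cases h : g m < g x <;> simp [h, ih]
  simp only [PySem.List.max?, List.foldl_cons, pvPickMax]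
  exact aux rest k0

theorem pv_insertBy_cons {α : Type} (before : α → α → Bool) (x h : α) (t : List α) :
    PySem.List.insertBy before x (h :: t)
      = if before x h then x :: h :: t else h :: PySem.List.insertBy before x t := by
  simp [PySem.List.insertBy]

-- Head of an insertion-sort fold from a nonempty accumulator is the running "first min".
theorem pv_head_foldl_insertBy {α : Type} (before : α → α → Bool) :
    ∀ (xs : List α) (h : α) (t : List α),
      (xs.foldl (fun acc x => PySem.List.insertBy before x acc) (h :: t)).head?
        = some (xs.foldl (fun m x => if before x m then x else m) h) := by
  intro xs
  induction xs with
  | nil => intro h t; rfl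
  | cons x xs ih =>
    intro h t
    simp only [List.foldl_cons, pv_insertBy_cons]
    by_cases hb : before x h = true
    · simp [hb, ih]
    · have hb' : before x h = false := by
        cases hbb : before x h <;> simp [hbb] at hb ⊢
      simp [hb', ih]

-- Folding the comparison over the mapped pair list is folding it over the keys.
theorem pv_foldl_pair {α : Type} (g : α → Int) :
    ∀ (rest : List α) (k0 : α),
      (rest.map (fun k => (k, g k))).foldl
          (fun m x => if decide ((fun kv : α × Int => -kv.2) x < (fun kv : α × Int => -kv.2) m) then x else m)
          (k0, g k0)
        = (pvPickMax g k0 rest, g (pvPickMax g k0 rest)) := by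
  intro rest
  induction rest with
  | nil => intro k0; rfl
  | cons x xs ih =>
    intro k0
    simp only [List.map_cons, List.foldl_cons, pvPickMax] at *
    have hiff : (-(g x) < -(g k0)) ↔ (g k0 < g x) := by omega
    by_cases h : g k0 < g x
    · simp only [hiff, h, decide_true, if_pos]
      exact ih x
    · simp only [hiff, h, decide_false, if_false]
      exact ih k0

-- Any pair of the input list has its key among the keys of the insert-fold dict.
theorem pv_mem_keys_foldl (f : PySem.Dict String Int → (String × Int) → Int)
    (l : List (String × Int)) (p : String × Int) (hp : p ∈ l) :
    p.1 ∈ (l.foldl (fun d kv => d.insert kv.1 (f d kv)) PySem.Dict.empty).keys := by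
  rw [PySem.Dict.keys_foldl_insert_key l (fun kv => kv.1) f PySem.Dict.empty]
  rw [PySem.Dict.keys_empty, PySem.Set.update_nil_left, PySem.Set.mem_ofList]
  exact List.mem_map_of_mem hp

-- Selection agreement: first-max over keys vs head of the stable sort of items.
theorem pv_select_eq (d : PySem.Dict String Int) (hnd : d.keys.Nodup)
    (k0 : String) (ks : List String) (hk : d.keys = k0 :: ks) :
    (match PySem.List.max? d.keys (fun k => d.getD k 0) with
     | some max_key => (max_key, d.getD max_key 0)
     | none => ("", 0))
    = (match PySem.List.sorted d.items (fun kv => -kv.2) false with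
       | kv :: _ => kv
       | [] => ("", 0)) := by
  have hitems : d.items = d.keys.map (fun k => (k, d.getD k 0)) :=
    PySem.Dict.items_eq_map_keys d hnd 0
  set g : String → Int := fun k => d.getD k 0 with hg
  have hmax := pv_max?_cons g k0 ks
  have hsorted :
      (PySem.List.sorted d.items (fun kv => -kv.2) false).head?
        = some (pvPickMax g k0 ks, g (pvPickMax g k0 ks)) := by
    rw [hitems, hk]
    simp only [PySem.List.sorted, List.map_cons, List.foldl_cons]
    have h1 : PySem.List.insertBy (fun a b : String × Int => decide (-a.2 < -b.2)) (k0, g k0) []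
        = [(k0, g k0)] := by simp [PySem.List.insertBy]
    rw [if_neg (by simp), h1, pv_head_foldl_insertBy]
    rw [pv_foldl_pair g ks k0]
  rw [hk, hmax]
  cases hs : PySem.List.sorted d.items (fun kv => -kv.2) false with
  | nil => rw [hs] at hsorted; simp at hsorted
  | cons kv rest =>
    rw [hs] at hsorted
    simp only [List.head?_cons, Option.some.injEq] at hsorted
    rw [hsorted]

-- ===== VERDICT (by name: the statement is the Claim_ definition above) =====
theorem merge_and_find_max_spec : Claim_equal_merge_and_find_max := by
  intro results_list _ hpre
  unfold Spec_merge_and_find_max merge_and_find_max merge_and_find_max_alt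
  -- the two merged dicts are equal
  set pairs : List (String × Int) :=
    results_list.flatMap (fun result =>
      result.flatMap (fun sub_dict => (PySem.Dict.ofList sub_dict).items)) with hpairs
  have hmerge :
      results_list.foldl (fun merged_dict result =>
        result.foldl (fun merged_dict sub_dict =>
          (PySem.Dict.ofList sub_dict).items.foldl (fun merged_dict kv =>
            if merged_dict.contains kv.1 then
              merged_dict.insert kv.1 (merged_dict.getD kv.1 0 + kv.2)
            else
              merged_dict.insert kv.1 kv.2) merged_dict) merged_dict)
        (PySem.Dict.empty : PySem.Dict String Int)
      = pairs.foldl (fun merged kv => merged.insert kv.1 (merged.getD kv.1 0 + kv.2))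
          (PySem.Dict.empty : PySem.Dict String Int) := by
    rw [hpairs, pv_foldl_flatMap]
    congr 1
    funext acc result
    rw [pv_foldl_flatMap]
    congr 1
    funext acc' sub_dict
    apply PySem.List.foldl_congr_mem
    intro acc'' kv _
    exact pv_step_eq acc'' kv
  rw [hmerge]
  set d : PySem.Dict String Int :=
    pairs.foldl (fun merged kv => merged.insert kv.1 (merged.getD kv.1 0 + kv.2))
      (PySem.Dict.empty : PySem.Dict String Int) with hd
  have hnd : d.keys.Nodup := by
    rw [hd]
    exact PySem.Dict.nodup_keys_foldl_insert_key pairs (fun kv => kv.1)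
      (fun m kv => m.getD kv.1 0 + kv.2) PySem.Dict.empty (by simp [PySem.Dict.keys_empty])
  -- from Pre_: pairs ≠ [], hence d.keys ≠ []
  obtain ⟨result, hr, sub_dict, hs, hne⟩ := hpre
  have hpairs_ne : pairs ≠ [] := by
    rw [hpairs]
    intro hnil
    rw [List.flatMap_eq_nil_iff] at hnil
    have h2 := hnil result hr
    rw [List.flatMap_eq_nil_iff] at h2
    have h3 := h2 sub_dict hs
    cases hsd : sub_dict with
    | nil => exact hne hsd
    | cons p t =>
      have hp : p ∈ sub_dict := by rw [hsd]; exact List.mem_cons_self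
      have hmem : p.1 ∈ (PySem.Dict.ofList sub_dict).keys := by
        simp only [PySem.Dict.ofList, PySem.Dict.update]
        exact pv_mem_keys_foldl (fun _ kv => kv.2) sub_dict p hp
      simp only [PySem.Dict.keys, h3] at hmem
      simp at hmem
  have hkeys_ne : d.keys ≠ [] := by
    cases hps : pairs with
    | nil => exact absurd hps hpairs_ne
    | cons p t =>
      have hp : p ∈ pairs := by rw [hps]; exact List.mem_cons_self
      have hmem : p.1 ∈ d.keys := by
        rw [hd]
        exact pv_mem_keys_foldl (fun m kv => m.getD kv.1 0 + kv.2) pairs p hp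
      intro hnil
      rw [hnil] at hmem
      simp at hmem
  cases hk : d.keys with
  | nil => exact absurd hk hkeys_ne
  | cons k0 ks =>
    exact pv_select_eq d hnd k0 ks hk
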